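-- pv_equiv track=rewrite | github.com/bigdale123/CS103 | Lab13/lab13_graded.py | animalLegs
-- ===== SOURCE A (Python) =====
-- def animalLegs(d2):
--     legs = 0
--     for i in d2.keys():
--         if i == "chickens":
--             legs += d2[i]*2
--         else:
--             legs += d2[i]*4
--     return legs
-- ===== SOURCE B (Python) =====
-- def animalLegs(d2):
--     # Divide-and-conquer: split the items list in halves and add the two subtotals;
--     # a single item contributes v*2 for chickens, v*4 otherwise.
--     def go(items):
--         if not items:
--             return 0
--         if len(items) == 1:
--             k, v = items[0]
--             return v * (2 if k == "chickens" else 4)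
--         mid = len(items) // 2
--         return go(items[:mid]) + go(items[mid:])
--     return go(list(d2.items()))
-- ===== Notes on version B (the rewrite author's own statement) =====
-- stated objective: alternative
-- what changed: Replaces A's linear accumulator loop over the keys (with a per-key dict lookup and if/else) by a divide-and-conquer recursion on the items list: split in halves, recurse, add the two subtotals; correct because integer addition is associative and commutative.
import Mathlib
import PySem

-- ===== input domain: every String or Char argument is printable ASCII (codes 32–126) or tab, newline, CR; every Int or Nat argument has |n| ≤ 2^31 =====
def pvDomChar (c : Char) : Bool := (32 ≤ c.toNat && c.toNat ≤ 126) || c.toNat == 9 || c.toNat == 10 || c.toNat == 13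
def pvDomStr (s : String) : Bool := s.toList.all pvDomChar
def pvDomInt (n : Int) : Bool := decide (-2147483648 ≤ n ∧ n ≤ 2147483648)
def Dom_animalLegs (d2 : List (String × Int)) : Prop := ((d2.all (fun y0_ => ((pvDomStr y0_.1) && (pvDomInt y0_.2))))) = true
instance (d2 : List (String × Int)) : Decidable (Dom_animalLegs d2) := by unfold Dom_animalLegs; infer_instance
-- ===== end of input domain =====

-- B sums the legs by divide-and-conquer on the items list (split in halves, add subtotals) instead of A's linear if/else accumulator loop; objective: alternative.


-- ===== PORT A =====
def animalLegs (d2 : List (String × Int)) : Int :=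
  (PySem.Dict.mk d2).keys.foldl (fun legs i =>
    if i == "chickens" then legs + (PySem.Dict.mk d2).getD i 0 * 2
    else legs + (PySem.Dict.mk d2).getD i 0 * 4) 0

-- ===== PORT B =====
-- `go(items)` of Source B: empty → 0; singleton → its leg count; else recurse on the two halves.
def animalLegsGo (items : List (String × Int)) : Int :=
  match h : items with
  | [] => 0
  | [(k, v)] => v * (if k == "chickens" then 2 else 4)
  | _ :: _ :: _ =>
    let mid := items.length / 2
    animalLegsGo (items.take mid) + animalLegsGo (items.drop mid)
termination_by items.length
decreasing_by
  · simp_all [List.length_take]; omega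
  · simp_all [List.length_drop]; omega

def animalLegs_alt (d2 : List (String × Int)) : Int :=
  animalLegsGo (PySem.Dict.mk d2).items

-- ===== PRECONDITION & SPEC =====
-- Pre_ requires distinct keys: the assoc list stands for a Python dict, whose keys are
-- always distinct; on duplicate-key lists A's repeated first-match lookup is accidental.
def Pre_animalLegs (d2 : List (String × Int)) : Prop := (d2.map Prod.fst).Nodup
instance (d2 : List (String × Int)) : Decidable (Pre_animalLegs d2) := by unfold Pre_animalLegs; infer_instance
def pvWitness_animalLegs : (List (String × Int)) := [("chickens", 3), ("cows", 2)]
def Spec_animalLegs (d2 : List (String × Int)) (out : Int) : Prop := out = animalLegs_alt d2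
instance (d2 : List (String × Int)) (out : Int) : Decidable (Spec_animalLegs d2 out) := by unfold Spec_animalLegs; infer_instance

-- ===== CLAIM (what is proved, stated in full; the proofs are below) =====
def Claim_equal_animalLegs : Prop := ∀ (d2 : List (String × Int)), Dom_animalLegs d2 → Pre_animalLegs d2 → Spec_animalLegs d2 (animalLegs d2)

-- ===== LEMMAS AND PROOFS =====

def legsOf (p : String × Int) : Int := p.2 * (if p.1 == "chickens" then 2 else 4)

theorem go_eq_sum (items : List (String × Int)) :
    animalLegsGo items = (items.map legsOf).sum := by
  induction items using animalLegsGo.induct with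
  | case1 => simp [animalLegsGo]
  | case2 k v => simp [animalLegsGo, legsOf]
  | case3 items a b rest ih1 ih2 =>
    rw [animalLegsGo, ih1, ih2, ← List.sum_append, ← List.map_append, List.take_append_drop]

theorem loop_sum (d : List (String × Int)) (ks : List String) (init : Int) :
    ks.foldl (fun legs i =>
      if i == "chickens" then legs + (PySem.Dict.mk d).getD i 0 * 2
      else legs + (PySem.Dict.mk d).getD i 0 * 4) init
    = init + (ks.map (fun i =>
      if i == "chickens" then (PySem.Dict.mk d).getD i 0 * 2
      else (PySem.Dict.mk d).getD i 0 * 4)).sum := by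
  induction ks generalizing init with
  | nil => simp
  | cons x xs ih =>
    simp only [List.foldl_cons, List.map_cons, List.sum_cons, ih]
    split_ifs <;> ring

theorem a_eq_sum (d2 : List (String × Int)) (h : (d2.map Prod.fst).Nodup) :
    animalLegs d2 = (d2.map legsOf).sum := by
  unfold animalLegs
  induction d2 with
  | nil => rfl
  | cons p rest ih =>
    obtain ⟨k, v⟩ := p
    simp only [List.map_cons, List.nodup_cons] at h
    obtain ⟨hk, hn⟩ := h
    have hkeys : (PySem.Dict.mk ((k, v) :: rest)).keys = k :: (PySem.Dict.mk rest).keys := by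
      simp [PySem.Dict.keys]
    have hlook : ∀ i ∈ (PySem.Dict.mk rest).keys,
        (PySem.Dict.mk ((k, v) :: rest)).getD i 0 = (PySem.Dict.mk rest).getD i 0 := by
      intro i hi
      have hik : k ≠ i := by
        rintro rfl; exact hk (by simpa [PySem.Dict.keys] using hi)
      simp [PySem.Dict.getD, PySem.Dict.get?_mk_cons, beq_iff_eq, hik]
    have hmap : ((PySem.Dict.mk rest).keys.map (fun i =>
        if i == "chickens" then (PySem.Dict.mk ((k, v) :: rest)).getD i 0 * 2
        else (PySem.Dict.mk ((k, v) :: rest)).getD i 0 * 4))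
      = ((PySem.Dict.mk rest).keys.map (fun i =>
        if i == "chickens" then (PySem.Dict.mk rest).getD i 0 * 2
        else (PySem.Dict.mk rest).getD i 0 * 4)) := by
      apply List.map_congr_left
      intro i hi
      rw [hlook i hi]
    have hhead : (PySem.Dict.mk ((k, v) :: rest)).getD k 0 = v := by
      simp [PySem.Dict.getD, PySem.Dict.get?_mk_cons]
    rw [hkeys, loop_sum, List.map_cons, List.sum_cons, hmap]
    rw [loop_sum] at ih
    have ihx := ih hn
    simp only [zero_add] at ihx
    rw [ihx, List.map_cons, List.sum_cons, hhead]
    unfold legsOf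
    split_ifs <;> ring

theorem items_mk (d2 : List (String × Int)) : (PySem.Dict.mk d2).items = d2 := rfl

-- ===== VERDICT (by name: the statement is the Claim_ definition above) =====
theorem animalLegs_spec : Claim_equal_animalLegs := by
  intro d2 _ hpre
  unfold Spec_animalLegs animalLegs_alt
  rw [items_mk, go_eq_sum, a_eq_sum d2 hpre]
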